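-- pv_equiv track=rewrite | github.com/Mcusac/kaggle-ml-comp-scripts | scripts/layers/layer_1_competition/level_1_impl/level_arc_agi_2/level_0/ranking/heuristics.py | _most_common_non_zero_color
-- ===== SOURCE A (Python) =====
-- def _most_common_non_zero_color(input_grid: list[list[int]]) -> int:
--     counts: dict[int, int] = {}
--     for row in input_grid:
--         for value in row:
--             color = int(value)
--             if color == 0:
--                 continue
--             counts[color] = counts.get(color, 0) + 1
--     if not counts:
--         return 0
--     return max(counts.items(), key=lambda kv: (kv[1], -kv[0]))[0]
-- ===== SOURCE B (Python) =====
-- def _most_common_non_zero_color(input_grid: list[list[int]]) -> int: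
--     vals = sorted(int(v) for row in input_grid for v in row if int(v) != 0)
--     best_color = 0
--     best_count = 0
--     run_color = None
--     run_len = 0
--     for v in vals:
--         if run_color == v:
--             run_len += 1
--         else:
--             run_color = v
--             run_len = 1
--         if run_len > best_count:
--             best_color = v
--             best_count = run_len
--     return best_color
-- ===== Notes on version B (the rewrite author's own statement) =====
-- stated objective: alternative
-- what changed: A builds a color->count dict in grid order and takes max over its items with key (count, -color); B sorts the flattened non-zero cells and makes one run-length scan over the sorted list, updating the best only on a strictly longer run, so ties keep the smallest color.
import Mathlib
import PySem

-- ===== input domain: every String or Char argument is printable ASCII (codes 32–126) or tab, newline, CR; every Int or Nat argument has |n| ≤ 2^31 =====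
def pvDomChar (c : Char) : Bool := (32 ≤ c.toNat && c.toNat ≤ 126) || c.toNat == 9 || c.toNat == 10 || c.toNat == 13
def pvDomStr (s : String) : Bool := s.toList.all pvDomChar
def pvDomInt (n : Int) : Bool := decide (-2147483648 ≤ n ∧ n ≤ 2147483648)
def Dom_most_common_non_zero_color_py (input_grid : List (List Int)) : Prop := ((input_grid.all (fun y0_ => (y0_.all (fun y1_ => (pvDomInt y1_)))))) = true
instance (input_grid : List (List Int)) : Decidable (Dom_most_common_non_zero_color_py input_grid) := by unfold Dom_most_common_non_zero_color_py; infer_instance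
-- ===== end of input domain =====

-- B replaces A's dict-counting + keyed max by: sort the flattened non-zero cells and take one
-- run-length scan, updating best only on strictly longer runs (objective: alternative).

-- ===== PORT A =====
-- counts[color] = counts.get(color, 0) + 1 over all cells, skipping zeros; int(value) is the
-- identity on int cells. max(items, key=(count, -color)) is PySem.List.max2? (first extremal).
def most_common_non_zero_color_py (input_grid : List (List Int)) : Int :=
  let counts : PySem.Dict Int Int :=
    input_grid.foldl
      (fun counts row =>
        row.foldl
          (fun counts value =>
            if value == 0 then counts
            else counts.insert value (counts.getD value 0 + 1))
          counts)
      PySem.Dict.empty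
  if counts.items.isEmpty then 0
  else
    match PySem.List.max2? counts.items (fun kv => kv.2) (fun kv => -kv.1) with
    | some kv => kv.1
    | none => 0  -- unreachable: items is nonempty here

-- ===== PORT B =====
-- vals = sorted(v for row in grid for v in row if v != 0); one pass over vals maintaining
-- (best_color, best_count, run_color, run_len), updating best on strictly longer runs.
def most_common_non_zero_color_py_alt (input_grid : List (List Int)) : Int :=
  let vals := PySem.List.sorted
    (input_grid.flatMap (fun row => row.filter (fun v => !(v == 0)))) (fun v => v) false
  let st := vals.foldl
    (fun (st : Int × Int × Option Int × Int) v =>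
      match st with
      | (bc, bn, rc, rl) =>
        let p := if rc == some v then (rc, rl + 1) else (some v, (1 : Int))
        match p with
        | (rc, rl) => if rl > bn then (v, rl, rc, rl) else (bc, bn, rc, rl))
    ((0 : Int), (0 : Int), (none : Option Int), (0 : Int))
  st.1

-- ===== PRECONDITION & SPEC =====
def Spec_most_common_non_zero_color_py (input_grid : List (List Int)) (out : Int) : Prop := out = most_common_non_zero_color_py_alt input_grid
instance (input_grid : List (List Int)) (out : Int) : Decidable (Spec_most_common_non_zero_color_py input_grid out) := by unfold Spec_most_common_non_zero_color_py; infer_instance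

-- ===== CLAIM (what is proved, stated in full; the proofs are below) =====
def Claim_equal_most_common_non_zero_color_py : Prop := ∀ (input_grid : List (List Int)), Dom_most_common_non_zero_color_py input_grid → Spec_most_common_non_zero_color_py input_grid (most_common_non_zero_color_py input_grid)

-- ===== LEMMAS AND PROOFS =====

-- skipping zeros inside the fold is folding over the filtered list
theorem foldl_skip_zero (h : PySem.Dict Int Int → Int → PySem.Dict Int Int) :
    ∀ (xs : List Int) (d : PySem.Dict Int Int),
      xs.foldl (fun d v => if v == 0 then d else h d v) d
        = (xs.filter (fun v => !(v == 0))).foldl h d := by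
  intro xs
  induction xs with
  | nil => intro d; rfl
  | cons v t ih =>
    intro d
    by_cases hv : (v == 0) = true
    · simp only [List.foldl_cons, List.filter_cons]
      rw [if_pos hv, if_neg (by simp [hv])]
      exact ih d
    · simp only [List.foldl_cons, List.filter_cons]
      rw [if_neg hv, if_pos (by simp_all)]
      exact ih (h d v)

-- A's nested counting loop builds Counter(vals)
theorem countsEq (g : List (List Int)) :
    g.foldl
      (fun counts row =>
        row.foldl
          (fun counts value =>
            if value == 0 then counts
            else counts.insert value (counts.getD value 0 + 1))
          counts)
      PySem.Dict.empty
      = PySem.Dict.counter (g.flatMap (fun row => row.filter (fun v => !(v == 0)))) := by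
  rw [← PySem.Dict.foldl_insert_getD_add_one_eq_counter, ← List.filter_flatMap,
      ← foldl_skip_zero, List.foldl_flatMap]

-- first-extremal max over pairs with key (count, -color): characterisation
theorem maxA : ∀ (L : List (Int × Int)) (m : Int × Int),
    ∃ r, PySem.List.max2? (m :: L) (fun kv => kv.2) (fun kv => -kv.1) = some r ∧
      r ∈ m :: L ∧ ∀ p ∈ m :: L, p.2 < r.2 ∨ (p.2 = r.2 ∧ r.1 ≤ p.1) := by
  intro L
  induction L with
  | nil =>
    intro m
    exact ⟨m, rfl, List.mem_singleton.mpr rfl, by intro p hp; simp at hp; subst hp; omega⟩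
  | cons x t ih =>
    intro m
    by_cases hc : m.2 < x.2 ∨ m.2 ≤ x.2 ∧ x.1 < m.1
    · obtain ⟨r, hr, hmem, hall⟩ := ih x
      refine ⟨r, ?_, ?_, ?_⟩
      · simpa [PySem.List.max2?, List.foldl_cons, hc] using hr
      · rcases List.mem_cons.mp hmem with h | h
        · exact List.mem_cons.mpr (Or.inr (List.mem_cons.mpr (Or.inl h)))
        · exact List.mem_cons.mpr (Or.inr (List.mem_cons.mpr (Or.inr h)))
      · intro p hp
        rcases List.mem_cons.mp hp with h | h
        · subst h
          have hx := hall x (List.mem_cons_self)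
          omega
        · exact hall p h
    · obtain ⟨r, hr, hmem, hall⟩ := ih m
      refine ⟨r, ?_, ?_, ?_⟩
      · simpa [PySem.List.max2?, List.foldl_cons, hc] using hr
      · rcases List.mem_cons.mp hmem with h | h
        · exact List.mem_cons.mpr (Or.inl h)
        · exact List.mem_cons.mpr (Or.inr (List.mem_cons.mpr (Or.inr h)))
      · intro p hp
        rcases List.mem_cons.mp hp with h | h
        · subst h; exact hall p (List.mem_cons_self)
        · rcases List.mem_cons.mp h with h' | h'
          · subst h'
            have hm := hall m (List.mem_cons_self)
            omega
          · exact hall p (List.mem_cons.mpr (Or.inr h'))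

-- B's strict-improvement scan over strictly increasing colors: characterisation
theorem maxB : ∀ (cs : List Int) (f : Int → Int) (m : Int),
    cs.Pairwise (· < ·) → (∀ c ∈ cs, m < c) →
    ∃ r : Int × Int,
      cs.foldl (fun best c => if f c > best.2 then (c, f c) else best) (m, f m) = r ∧
        r.2 = f r.1 ∧ r.1 ∈ m :: cs ∧
        ∀ d ∈ m :: cs, f d < f r.1 ∨ (f d = f r.1 ∧ r.1 ≤ d) := by
  intro cs
  induction cs with
  | nil =>
    intro f m _ _
    exact ⟨(m, f m), rfl, rfl, List.mem_singleton.mpr rfl,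
      by intro d hd; simp at hd; subst hd; simp⟩
  | cons c t ih =>
    intro f m hpw hm
    have hmc : m < c := hm c List.mem_cons_self
    have hct : ∀ d ∈ t, c < d := fun d hd => (List.pairwise_cons.mp hpw).1 d hd
    have hpt : t.Pairwise (· < ·) := (List.pairwise_cons.mp hpw).2
    by_cases hcond : f c > f m
    · obtain ⟨r, hr, hr2, hmem, hall⟩ := ih f c hpt hct
      refine ⟨r, ?_, hr2, ?_, ?_⟩
      · simpa [List.foldl_cons, hcond] using hr
      · rcases List.mem_cons.mp hmem with h | h
        · exact List.mem_cons.mpr (Or.inr (List.mem_cons.mpr (Or.inl h)))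
        · exact List.mem_cons.mpr (Or.inr (List.mem_cons.mpr (Or.inr h)))
      · intro d hd
        rcases List.mem_cons.mp hd with h | h
        · subst h
          have hc := hall c List.mem_cons_self
          omega
        · exact hall d h
    · obtain ⟨r, hr, hr2, hmem, hall⟩ := ih f m hpt
        (fun d hd => lt_trans hmc (hct d hd))
      refine ⟨r, ?_, hr2, ?_, ?_⟩
      · simpa [List.foldl_cons, hcond] using hr
      · rcases List.mem_cons.mp hmem with h | h
        · exact List.mem_cons.mpr (Or.inl h)
        · exact List.mem_cons.mpr (Or.inr (List.mem_cons.mpr (Or.inr h)))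
      · intro d hd
        rcases List.mem_cons.mp hd with h | h
        · subst h; exact hall d List.mem_cons_self
        · rcases List.mem_cons.mp h with h' | h'
          · subst h'
            have hmr := hall m List.mem_cons_self
            omega
          · exact hall d (List.mem_cons.mpr (Or.inr h'))

-- the color maximising (count, -color) is unique
theorem argmax_unique (S : List Int) (f : Int → Int) (a b : Int)
    (ha : a ∈ S) (hb : b ∈ S)
    (Ha : ∀ d ∈ S, f d < f a ∨ (f d = f a ∧ a ≤ d))
    (Hb : ∀ d ∈ S, f d < f b ∨ (f d = f b ∧ b ≤ d)) : a = b := by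
  have h1 := Ha b hb
  have h2 := Hb a ha
  omega

-- proof-local abbreviation: the flattened non-zero cells
def pvVals (g : List (List Int)) : List Int :=
  g.flatMap (fun row => row.filter (fun v => !(v == 0)))

theorem aEq (g : List (List Int)) : most_common_non_zero_color_py g =
    (if (PySem.Dict.counter (pvVals g)).items.isEmpty then 0
     else
       match PySem.List.max2? (PySem.Dict.counter (pvVals g)).items
           (fun kv => kv.2) (fun kv => -kv.1) with
       | some kv => kv.1
       | none => 0) := by
  simp only [most_common_non_zero_color_py, pvVals, countsEq]

-- one step of B's run scan (identical to the port's fold body)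
def pvStep (st : Int × Int × Option Int × Int) (v : Int) : Int × Int × Option Int × Int :=
  match st with
  | (bc, bn, rc, rl) =>
    let p := if rc == some v then (rc, rl + 1) else (some v, (1 : Int))
    match p with
    | (rc, rl) => if rl > bn then (v, rl, rc, rl) else (bc, bn, rc, rl)

theorem altEq (g : List (List Int)) : most_common_non_zero_color_py_alt g =
    ((PySem.List.sorted (pvVals g) (fun v => v) false).foldl pvStep
      ((0 : Int), (0 : Int), (none : Option Int), (0 : Int))).1 := rfl

-- continuing inside a run of the current color
theorem repCont : ∀ (n : Nat) (c bc bn rl : Int), rl ≤ bn →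
    (List.replicate n c).foldl pvStep (bc, bn, some c, rl)
      = if bn < rl + (n : Int) then (c, rl + (n : Int), some c, rl + (n : Int))
        else (bc, bn, some c, rl + (n : Int)) := by
  intro n
  induction n with
  | zero =>
    intro c bc bn rl h
    rw [if_neg (by push_cast; omega)]
    simp
  | succ m ih =>
    intro c bc bn rl h
    rw [List.replicate_succ, List.foldl_cons]
    have hstep : pvStep (bc, bn, some c, rl) c
        = if bn < rl + 1 then (c, rl + 1, some c, rl + 1) else (bc, bn, some c, rl + 1) := by
      simp only [pvStep, BEq.rfl, if_pos, gt_iff_lt]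
    rw [hstep]
    by_cases h1 : bn < rl + 1
    · rw [if_pos h1, ih c c (rl + 1) (rl + 1) (le_refl _)]
      have hcond : bn < rl + ((m + 1 : Nat) : Int) := by omega
      rw [if_pos hcond]
      split_ifs <;>
        first
          | rfl
          | (simp only [Prod.mk.injEq, true_and]; omega)
    · rw [if_neg h1, ih c bc bn (rl + 1) (by omega)]
      split_ifs <;>
        first
          | rfl
          | (simp only [Prod.mk.injEq, true_and]; omega)

-- a whole run of a fresh color c of length n ≥ 1
theorem blockFold : ∀ (n : Nat) (c bc bn rl : Int) (rc : Option Int), 1 ≤ n →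
    rc ≠ some c → 0 ≤ bn →
    (List.replicate n c).foldl pvStep (bc, bn, rc, rl)
      = if bn < (n : Int) then (c, (n : Int), some c, (n : Int))
        else (bc, bn, some c, (n : Int)) := by
  intro n c bc bn rl rc hn hne hbn
  obtain ⟨m, rfl⟩ : ∃ m, n = m + 1 := ⟨n - 1, by omega⟩
  rw [List.replicate_succ, List.foldl_cons]
  have hbeq : (rc == some c) = false := by
    simp [hne]
  have hstep : pvStep (bc, bn, rc, rl) c
      = if bn < 1 then (c, 1, some c, 1) else (bc, bn, some c, 1) := by
    simp only [pvStep, hbeq, Bool.false_eq_true, if_false, gt_iff_lt]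
  rw [hstep]
  by_cases h1 : bn < 1
  · rw [if_pos h1, repCont m c c 1 1 (le_refl _)]
    have hcond : bn < ((m + 1 : Nat) : Int) := by omega
    rw [if_pos hcond]
    split_ifs <;>
      first
        | rfl
        | (simp only [Prod.mk.injEq, true_and]; omega)
  · rw [if_neg h1, repCont m c bc bn 1 (by omega)]
    split_ifs <;>
      first
        | rfl
        | (simp only [Prod.mk.injEq, true_and]; omega)

-- the run scan over a block decomposition computes the strict-improvement pair fold
theorem runToBlocks : ∀ (cs : List Int) (f : Int → Nat) (bc bn : Int) (rc : Option Int)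
    (rl : Int), cs.Pairwise (· < ·) → (∀ c ∈ cs, 1 ≤ f c) → (∀ c ∈ cs, rc ≠ some c) →
    0 ≤ bn →
    ∃ rc' rl',
      (cs.flatMap (fun c => List.replicate (f c) c)).foldl pvStep (bc, bn, rc, rl)
        = ((cs.foldl (fun (best : Int × Int) c =>
              if ((f c : Int)) > best.2 then (c, (f c : Int)) else best) (bc, bn)).1,
           (cs.foldl (fun (best : Int × Int) c =>
              if ((f c : Int)) > best.2 then (c, (f c : Int)) else best) (bc, bn)).2,
           rc', rl') := by
  intro cs
  induction cs with
  | nil =>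
    intro f bc bn rc rl _ _ _ _
    exact ⟨rc, rl, rfl⟩
  | cons c ct ih =>
    intro f bc bn rc rl hpw hf hrc hbn
    rw [List.flatMap_cons, List.foldl_append, List.foldl_cons]
    rw [blockFold (f c) c bc bn rl rc (hf c List.mem_cons_self) (hrc c List.mem_cons_self) hbn]
    have hct : ∀ d ∈ ct, c < d := fun d hd => (List.pairwise_cons.mp hpw).1 d hd
    have hpt : ct.Pairwise (· < ·) := (List.pairwise_cons.mp hpw).2
    have hrc' : ∀ d ∈ ct, (some c : Option Int) ≠ some d := by
      intro d hd h
      exact absurd (Option.some.inj h) (ne_of_lt (hct d hd))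
    have hfi : ∀ d ∈ ct, 1 ≤ f d := fun d hd => hf d (List.mem_cons.mpr (Or.inr hd))
    by_cases h : bn < ((f c : Int))
    · rw [if_pos h, if_pos (by exact h)]
      exact ih f c ((f c : Int)) (some c) ((f c : Int)) hpt hfi hrc' (by positivity)
    · rw [if_neg h, if_neg (by exact h)]
      exact ih f bc bn (some c) ((f c : Int)) hpt hfi hrc' hbn

-- counts in a block decomposition
theorem countFlat : ∀ (cs : List Int) (gl : Int → Nat) (a : Int), cs.Nodup →
    List.count a (cs.flatMap (fun c => List.replicate (gl c) c))
      = if a ∈ cs then gl a else 0 := by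
  intro cs
  induction cs with
  | nil => intro gl a _; simp
  | cons c ct ih =>
    intro gl a hnd
    rw [List.flatMap_cons, List.count_append, List.count_replicate,
      ih gl a (List.nodup_cons.mp hnd).2]
    by_cases hac : a = c
    · subst hac
      have : a ∉ ct := (List.nodup_cons.mp hnd).1
      simp [this]
    · simp [hac, Ne.symm hac, List.mem_cons]

-- a block decomposition with increasing colors is sorted
theorem pwFlat : ∀ (cs : List Int) (gl : Int → Nat), cs.Pairwise (· < ·) →
    (cs.flatMap (fun c => List.replicate (gl c) c)).Pairwise (· ≤ ·) := by
  intro cs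
  induction cs with
  | nil => intro gl _; simp
  | cons c ct ih =>
    intro gl hpw
    rw [List.flatMap_cons, List.pairwise_append]
    refine ⟨?_, ih gl (List.pairwise_cons.mp hpw).2, ?_⟩
    · rw [List.pairwise_replicate]
      exact Or.inr (le_refl c)
    · intro x hx y hy
      obtain ⟨d, hd, hyd⟩ := List.mem_flatMap.mp hy
      rw [List.eq_of_mem_replicate hx, List.eq_of_mem_replicate hyd]
      exact le_of_lt ((List.pairwise_cons.mp hpw).1 d hd)

-- sorted(vals) is the concatenation of one run per distinct color, colors increasing
theorem sortedDecomp (vals : List Int) :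
    PySem.List.sorted vals (fun v => v) false
      = (PySem.List.sorted (PySem.Set.ofList vals) (fun v => v) false).flatMap
          (fun c => List.replicate (vals.count c) c) := by
  have hpw := PySem.List.sorted_ofList_pairwise_lt vals
  have hnd : (PySem.List.sorted (PySem.Set.ofList vals) (fun v => v) false).Nodup :=
    hpw.imp (fun h => ne_of_lt h)
  apply PySem.List.sorted_id_eq_of_perm_of_pairwise
  · rw [List.perm_iff_count]
    intro a
    rw [countFlat _ _ _ hnd]
    by_cases ha : a ∈ PySem.List.sorted (PySem.Set.ofList vals) (fun v => v) false
    · simp [ha]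
    · have hav : a ∉ vals := by
        intro h
        exact ha ((PySem.List.mem_sorted _ _ _ a).mpr ((PySem.Set.mem_ofList vals a).mpr h))
      simp [ha, List.count_eq_zero_of_not_mem hav]
  · exact pwFlat _ _ hpw

-- ===== VERDICT (by name: the statement is the Claim_ definition above) =====
theorem most_common_non_zero_color_py_spec : Claim_equal_most_common_non_zero_color_py := by
  intro g _
  unfold Spec_most_common_non_zero_color_py
  have hcount1 : ∀ c ∈ PySem.Set.ofList (pvVals g), 1 ≤ ((pvVals g).count c : Int) := by
    intro c hc
    have hcv : c ∈ pvVals g := (PySem.Set.mem_ofList (pvVals g) c).mp hc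
    have := List.count_pos_iff.mpr hcv
    omega
  cases hS : (PySem.Set.ofList (pvVals g) : List Int) with
  | nil =>
    have hA : most_common_non_zero_color_py g = 0 := by
      rw [aEq]
      simp [PySem.Dict.items_counter, hS]
    have hB : most_common_non_zero_color_py_alt g = 0 := by
      rw [altEq, sortedDecomp, hS]
      rfl
    rw [hA, hB]
  | cons k0 ks =>
    -- A side: first-extremal max over the counter's items
    have hitems' : (PySem.Dict.counter (pvVals g)).items
        = (k0, ((pvVals g).count k0 : Int))
            :: ks.map (fun k => (k, ((pvVals g).count k : Int))) := by
      rw [PySem.Dict.items_counter, hS]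
      rfl
    obtain ⟨rA, hrA, hmemA, hallA⟩ :=
      maxA (ks.map (fun k => (k, ((pvVals g).count k : Int))))
        (k0, ((pvVals g).count k0 : Int))
    have hmemA' : rA ∈ (PySem.Set.ofList (pvVals g)).map
        (fun k => (k, ((pvVals g).count k : Int))) := by
      rw [hS]; simpa using hmemA
    obtain ⟨a, haS, hap⟩ := List.mem_map.mp hmemA'
    have hallA' : ∀ d ∈ (PySem.Set.ofList (pvVals g) : List Int),
        ((pvVals g).count d : Int) < ((pvVals g).count a : Int) ∨
          (((pvVals g).count d : Int) = ((pvVals g).count a : Int) ∧ a ≤ d) := by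
      intro d hd
      have hd' : (d, ((pvVals g).count d : Int))
          ∈ (k0, ((pvVals g).count k0 : Int))
              :: ks.map (fun k => (k, ((pvVals g).count k : Int))) := by
        have : (d, ((pvVals g).count d : Int)) ∈ (PySem.Set.ofList (pvVals g)).map
            (fun k => (k, ((pvVals g).count k : Int))) :=
          List.mem_map.mpr ⟨d, hd, rfl⟩
        rw [hS] at this; simpa using this
      have h := hallA _ hd'
      rw [← hap] at h
      simpa using h
    have hEqA : most_common_non_zero_color_py g = a := by
      rw [aEq, hitems']
      rw [if_neg (by simp)]
      rw [hrA, ← hap]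
    -- B side: run scan over sorted(vals) = strict-improvement scan over distinct colors
    have hnonnil : (PySem.Set.ofList (pvVals g) : List Int) ≠ [] := by rw [hS]; simp
    have hsortne :
        PySem.List.sorted (PySem.Set.ofList (pvVals g)) (fun v => v) false ≠ [] := by
      intro h
      exact hnonnil ((PySem.List.sorted_eq_nil_iff _ _ _).mp h)
    obtain ⟨m0, cs, hsort⟩ := List.exists_cons_of_ne_nil hsortne
    have hpw : (m0 :: cs).Pairwise (· < ·) := by
      rw [← hsort]; exact PySem.List.sorted_ofList_pairwise_lt (pvVals g)
    have hmemsort : ∀ x : Int,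
        x ∈ m0 :: cs ↔ x ∈ (PySem.Set.ofList (pvVals g) : List Int) := by
      intro x; rw [← hsort]; exact PySem.List.mem_sorted _ _ _ x
    have hm0 : m0 ∈ (PySem.Set.ofList (pvVals g) : List Int) :=
      (hmemsort m0).mp List.mem_cons_self
    have hfm0 : 1 ≤ ((pvVals g).count m0 : Int) := hcount1 m0 hm0
    have hcnt : ∀ c ∈ m0 :: cs, 1 ≤ (pvVals g).count c := by
      intro c hc
      have := hcount1 c ((hmemsort c).mp hc)
      omega
    obtain ⟨rc', rl', hrun⟩ :=
      runToBlocks (m0 :: cs) (fun c => (pvVals g).count c) 0 0 none 0 hpw hcnt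
        (by intro c _ h; simp at h) (le_refl _)
    obtain ⟨rB, hrB, hrB2, hmemB, hallB⟩ :=
      maxB cs (fun k => ((pvVals g).count k : Int)) m0
        (List.pairwise_cons.mp hpw).2 (List.pairwise_cons.mp hpw).1
    have hpair : (m0 :: cs).foldl
        (fun (best : Int × Int) c =>
          if (((pvVals g).count c : Int)) > best.2 then (c, ((pvVals g).count c : Int))
          else best) ((0 : Int), (0 : Int)) = rB := by
      rw [List.foldl_cons]
      have hstep : (if (((pvVals g).count m0 : Int)) > ((0 : Int), (0 : Int)).2
          then (m0, ((pvVals g).count m0 : Int)) else ((0 : Int), (0 : Int)))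
          = (m0, ((pvVals g).count m0 : Int)) := by
        rw [if_pos]
        show (0 : Int) < ((pvVals g).count m0 : Int)
        omega
      rw [hstep]
      exact hrB
    have hEqB : most_common_non_zero_color_py_alt g = rB.1 := by
      rw [altEq, sortedDecomp, hsort, hrun, hpair]
    have hallB' : ∀ d ∈ (PySem.Set.ofList (pvVals g) : List Int),
        ((pvVals g).count d : Int) < ((pvVals g).count rB.1 : Int) ∨
          (((pvVals g).count d : Int) = ((pvVals g).count rB.1 : Int) ∧ rB.1 ≤ d) := by
      intro d hd
      exact hallB d ((hmemsort d).mpr hd)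
    have hmemB' : rB.1 ∈ (PySem.Set.ofList (pvVals g) : List Int) :=
      (hmemsort rB.1).mp hmemB
    -- the two characterisations pick the same color
    have huniq : a = rB.1 :=
      argmax_unique (PySem.Set.ofList (pvVals g))
        (fun k => ((pvVals g).count k : Int)) a rB.1 haS hmemB' hallA' hallB'
    rw [hEqA, hEqB, huniq]
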